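-- pv_equiv track=rewrite | github.com/ssh-mitm/ssh-mitm | sshmitm/commands/pluginbrowser/formatters.py | help_module_section
-- ===== SOURCE A (Python) =====
-- def help_module_section(text: str) -> str:
--     """Extract only the 'default module' and 'available modules' lines from help text."""
--     lines = text.split("\n")
--     result: list[str] = []
--     in_section = False
--     for line in lines:
--         if line.startswith("default module:") or line.strip() == "available modules:":
--             in_section = True
--         if in_section:
--             result.append(line)
--     return "\n".join(result)
-- ===== SOURCE B (Python) =====
-- def help_module_section(text: str) -> str:
--     """Extract only the 'default module' and 'available modules' lines from help text."""
--     lines = text.split("\n")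
--     for i, line in enumerate(lines):
--         if line.startswith("default module:") or line.strip() == "available modules:":
--             return "\n".join(lines[i:])
--     return ""
-- ===== Notes on version B (the rewrite author's own statement) =====
-- stated objective: simpler
-- what changed: Replaces the flag-guarded append loop by locating the first matching line and returning a single join of the tail slice, with an early return.
import Mathlib
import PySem

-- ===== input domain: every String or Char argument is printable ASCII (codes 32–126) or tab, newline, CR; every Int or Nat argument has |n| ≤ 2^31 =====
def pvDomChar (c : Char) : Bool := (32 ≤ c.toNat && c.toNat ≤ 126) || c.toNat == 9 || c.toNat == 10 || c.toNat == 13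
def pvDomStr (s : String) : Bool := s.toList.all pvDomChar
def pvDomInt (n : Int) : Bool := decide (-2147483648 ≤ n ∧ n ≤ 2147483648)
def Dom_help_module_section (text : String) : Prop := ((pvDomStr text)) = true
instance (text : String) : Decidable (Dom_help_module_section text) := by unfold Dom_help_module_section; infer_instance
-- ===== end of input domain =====

-- B changes the decomposition: find the first matching line, then join the tail slice (simpler; same cost).

-- shared literal predicate: line.startswith("default module:") or line.strip() == "available modules:"
def hmsPred (line : String) : Bool :=
  PySem.Str.startswith line "default module:" || PySem.Str.strip line == "available modules:"

-- ===== PORT A =====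
def help_module_section (text : String) : String :=
  let lines := (PySem.Str.split? text "\n").getD []
  let st := lines.foldl (fun (st : List String × Bool) line =>
    let in_section := if hmsPred line then true else st.2
    if in_section then (st.1 ++ [line], in_section) else (st.1, in_section)) ([], false)
  PySem.Str.join "\n" st.1

-- ===== PORT B =====
def help_module_section_alt (text : String) : String :=
  let lines := (PySem.Str.split? text "\n").getD []
  match lines.findIdx? hmsPred with
  | some i => PySem.Str.join "\n" (lines.drop i)
  | none => ""

-- ===== PRECONDITION & SPEC =====
def Spec_help_module_section (text : String) (out : String) : Prop := out = help_module_section_alt text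
instance (text : String) (out : String) : Decidable (Spec_help_module_section text out) := by unfold Spec_help_module_section; infer_instance

-- ===== CLAIM (what is proved, stated in full; the proofs are below) =====
def Claim_equal_help_module_section : Prop := ∀ (text : String), Dom_help_module_section text → Spec_help_module_section text (help_module_section text)

-- ===== LEMMAS AND PROOFS =====

def hmsStep (st : List String × Bool) (line : String) : List String × Bool :=
  let in_section := if hmsPred line then true else st.2
  if in_section then (st.1 ++ [line], in_section) else (st.1, in_section)

theorem hmsStep_true (acc : List String) (ls : List String) :
    ls.foldl hmsStep (acc, true) = (acc ++ ls, true) := by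
  induction ls generalizing acc with
  | nil => simp
  | cons l ls ih =>
      simp only [List.foldl_cons, hmsStep]
      split <;> simp [ih]

theorem hmsStep_false (acc : List String) (ls : List String) :
    (ls.foldl hmsStep (acc, false)).1 =
      acc ++ (match ls.findIdx? hmsPred with
              | some i => ls.drop i
              | none => ([] : List String)) := by
  induction ls generalizing acc with
  | nil => simp
  | cons l ls ih =>
      by_cases h : hmsPred l = true
      · simp [hmsStep, h, hmsStep_true, List.findIdx?_cons]
      · simp only [List.foldl_cons, hmsStep, h, if_false, Bool.false_eq_true]
        rw [ih]
        simp [List.findIdx?_cons, h]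
        cases ls.findIdx? hmsPred <;> simp

-- ===== VERDICT (by name: the statement is the Claim_ definition above) =====
theorem help_module_section_spec : Claim_equal_help_module_section := by
  intro text _
  unfold Spec_help_module_section help_module_section help_module_section_alt
  show PySem.Str.join "\n" (((PySem.Str.split? text "\n").getD []).foldl hmsStep ([], false)).1 = _
  rw [hmsStep_false]
  rcases h : ((PySem.Str.split? text "\n").getD []).findIdx? hmsPred with _ | i <;>
    simp [h, PySem.Str.join]
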